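-- pv_equiv track=rewrite | github.com/sgbett/runar | compilers/python/runar_compiler/frontend/parser_python.py | _py_byte_string_to_hex
-- ===== SOURCE A (Python) =====
-- def _py_byte_string_to_hex(s: str) -> str:
--     """Convert Python byte string content like \\xde\\xad to hex 'dead'."""
--     result: list[str] = []
--     i = 0
--     while i < len(s):
--         if s[i] == "\\" and i + 1 < len(s):
--             if s[i + 1] == "x" and i + 3 < len(s):
--                 result.append(s[i + 2 : i + 4])
--                 i += 4
--                 continue
--             elif s[i + 1] == "0":
--                 result.append("00")
--                 i += 2
--                 continue
--         result.append(f"{ord(s[i]):02x}")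
--         i += 1
--     return "".join(result)
-- ===== SOURCE B (Python) =====
-- import re
--
-- _TOKEN = re.compile(r"\\x([\s\S]{2})|\\0|[\s\S]")
--
-- def _py_byte_string_to_hex(s: str) -> str:
--     out = []
--     for m in _TOKEN.finditer(s):
--         two = m.group(1)
--         if two is not None:
--             out.append(two)
--         elif m.group() == "\\0":
--             out.append("00")
--         else:
--             out.append(f"{ord(m.group()):02x}")
--     return "".join(out)
-- ===== Notes on version B (the rewrite author's own statement) =====
-- stated objective: idiomatic
-- what changed: Replaces the manual index-stepping while-loop with a precompiled regex of ordered alternatives (\x plus two arbitrary chars, \0, any single char) tokenizing the string via finditer, then a join.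
import Mathlib
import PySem

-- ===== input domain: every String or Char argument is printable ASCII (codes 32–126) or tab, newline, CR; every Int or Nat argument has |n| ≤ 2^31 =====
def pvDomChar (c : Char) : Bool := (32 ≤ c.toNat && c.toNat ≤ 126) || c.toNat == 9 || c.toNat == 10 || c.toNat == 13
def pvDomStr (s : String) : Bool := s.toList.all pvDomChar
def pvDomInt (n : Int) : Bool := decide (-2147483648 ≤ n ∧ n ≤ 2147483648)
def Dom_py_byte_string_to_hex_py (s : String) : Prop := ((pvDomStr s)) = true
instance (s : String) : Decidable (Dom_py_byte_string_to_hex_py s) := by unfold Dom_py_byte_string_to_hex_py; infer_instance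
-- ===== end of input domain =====

-- B replaces A's manual index-stepping loop with regex-style ordered-alternative tokenization (idiomatic, same cost).


-- ===== PORT A =====
-- f"{n:02x}": two lowercase hex digits (ord is ≤ 126 on the stated ASCII domain, so two digits is exact)
def pvHexDig (n : Nat) : Char := if n < 10 then Char.ofNat (48 + n) else Char.ofNat (87 + n)
def pvHex2 (c : Char) : String := String.ofList [pvHexDig (c.toNat / 16), pvHexDig (c.toNat % 16)]

-- the while-loop of A: index i stepping by 1/2/4 over the code points; s[i+2:i+4] is in range (i+3 < len)
def pyAgo (cs : List Char) (i : Nat) (acc : List String) : List String :=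
  if h : i < cs.length then
    if cs[i] = '\\' ∧ i + 1 < cs.length then
      if cs[i+1]? = some 'x' ∧ i + 3 < cs.length then
        pyAgo cs (i+4) (acc ++ [String.ofList ((cs.drop (i+2)).take 2)])
      else if cs[i+1]? = some '0' then
        pyAgo cs (i+2) (acc ++ ["00"])
      else
        pyAgo cs (i+1) (acc ++ [pvHex2 cs[i]])
    else
      pyAgo cs (i+1) (acc ++ [pvHex2 cs[i]])
  else acc
termination_by cs.length - i

def py_byte_string_to_hex_py (s : String) : String :=
  PySem.Str.join "" (pyAgo s.toList 0 [])

-- ===== PORT B =====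
-- hand port of the precompiled regex r"\\x([\s\S]{2})|\\0|[\s\S]" applied with finditer:
-- at each position the first matching ordered alternative consumes, exactly this pattern match
def pyBgo : List Char → List String
  | '\\' :: 'x' :: a :: b :: rest => String.ofList [a, b] :: pyBgo rest
  | '\\' :: '0' :: rest => "00" :: pyBgo rest
  | c :: rest => pvHex2 c :: pyBgo rest
  | [] => []

def py_byte_string_to_hex_py_alt (s : String) : String :=
  PySem.Str.join "" (pyBgo s.toList)

-- ===== PRECONDITION & SPEC =====
def Spec_py_byte_string_to_hex_py (s : String) (out : String) : Prop := out = py_byte_string_to_hex_py_alt s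
instance (s : String) (out : String) : Decidable (Spec_py_byte_string_to_hex_py s out) := by unfold Spec_py_byte_string_to_hex_py; infer_instance

-- ===== CLAIM (what is proved, stated in full; the proofs are below) =====
def Claim_equal_py_byte_string_to_hex_py : Prop := ∀ (s : String), Dom_py_byte_string_to_hex_py s → Spec_py_byte_string_to_hex_py s (py_byte_string_to_hex_py s)

-- ===== LEMMAS AND PROOFS =====

lemma pyBgo_x (a b : Char) (rest : List Char) :
    pyBgo ('\\' :: 'x' :: a :: b :: rest) = String.ofList [a, b] :: pyBgo rest := by simp [pyBgo]

lemma pyBgo_0 (rest : List Char) : pyBgo ('\\' :: '0' :: rest) = "00" :: pyBgo rest := by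
  simp [pyBgo]

lemma pyBgo_ne (c : Char) (rest : List Char) (hc : c ≠ '\\') :
    pyBgo (c :: rest) = pvHex2 c :: pyBgo rest := by
  rw [pyBgo.eq_def]; split <;> simp_all

lemma pyBgo_other (c2 : Char) (rest : List Char) (hx : c2 ≠ 'x') (h0 : c2 ≠ '0') :
    pyBgo ('\\' :: c2 :: rest) = pvHex2 '\\' :: pyBgo (c2 :: rest) := by
  rw [pyBgo.eq_def]
  split
  · simp_all
  · simp_all
  · rename_i c r h1 h2 heq
    injection heq with e1 e2
    rw [← e1, ← e2]
  · simp_all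

lemma pyAgo_eq (n : Nat) : ∀ (cs : List Char) (i : Nat) (acc : List String),
    cs.length - i = n → pyAgo cs i acc = acc ++ pyBgo (cs.drop i) := by
  induction n using Nat.strong_induction_on with
  | _ n ih =>
    intro cs i acc hn
    unfold pyAgo
    by_cases h : i < cs.length
    · simp only [dif_pos h]
      have hd0 : cs.drop i = cs[i] :: cs.drop (i+1) := List.drop_eq_getElem_cons h
      by_cases hb : cs[i] = '\\' ∧ i + 1 < cs.length
      · simp only [if_pos hb]
        obtain ⟨hbs, h1⟩ := hb
        have hd1 : cs.drop (i+1) = cs[i+1] :: cs.drop (i+2) := List.drop_eq_getElem_cons h1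
        by_cases hx : cs[i+1]? = some 'x' ∧ i + 3 < cs.length
        · simp only [if_pos hx]
          obtain ⟨hxs, h3⟩ := hx
          have h2 : i + 2 < cs.length := by omega
          have hd2 : cs.drop (i+2) = cs[i+2] :: cs.drop (i+3) := List.drop_eq_getElem_cons h2
          have hd3 : cs.drop (i+3) = cs[i+3] :: cs.drop (i+4) := List.drop_eq_getElem_cons h3
          rw [List.getElem?_eq_getElem h1] at hxs
          have hx1 : cs[i+1] = 'x' := by injection hxs
          have htake : List.take 2 (cs.drop (i+2)) = [cs[i+2], cs[i+3]] := by
            rw [hd2, hd3]; rfl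
          rw [ih (cs.length - (i+4)) (by omega) cs (i+4) _ rfl]
          rw [htake, hd0, hd1, hd2, hd3, hx1, hbs]
          rw [pyBgo_x]
          simp [List.append_assoc]
        · by_cases h0 : cs[i+1]? = some '0'
          · simp only [if_neg hx, if_pos h0]
            rw [List.getElem?_eq_getElem h1] at h0
            have h01 : cs[i+1] = '0' := by injection h0
            rw [ih (cs.length - (i+2)) (by omega) cs (i+2) _ rfl]
            rw [hd0, hd1, h01, hbs, pyBgo_0]
            simp [List.append_assoc]
          · simp only [if_neg hx, if_neg h0]
            rw [List.getElem?_eq_getElem h1] at h0 hx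
            have h0' : cs[i+1] ≠ '0' := fun hc => h0 (by rw [hc])
            rw [ih (cs.length - (i+1)) (by omega) cs (i+1) _ rfl]
            rw [hd0, hbs]
            by_cases hxc : cs[i+1] = 'x'
            · -- fall-through: s[i+1] = 'x' but fewer than two chars follow
              have h3 : ¬ i + 3 < cs.length := fun hc => hx ⟨by rw [hxc], hc⟩
              have : cs.drop (i+2) = [] ∨ ∃ a, cs.drop (i+2) = [a] := by
                have hl : (cs.drop (i+2)).length ≤ 1 := by simp; omega
                cases hdd : cs.drop (i+2) with
                | nil => exact Or.inl rfl
                | cons a t =>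
                  right
                  refine ⟨a, ?_⟩
                  rw [hdd] at hl
                  simp at hl
                  simp [hl]
              rw [hd1, hxc]
              rcases this with hdd | ⟨a, hdd⟩ <;> rw [hdd] <;>
                simp [pyBgo]
            · rw [hd1, pyBgo_other cs[i+1] _ hxc h0']
              simp [List.append_assoc]
      · simp only [if_neg hb]
        rw [ih (cs.length - (i+1)) (by omega) cs (i+1) _ rfl]
        rw [hd0]
        by_cases hbs : cs[i] = '\\'
        · have h1 : ¬ i + 1 < cs.length := fun hc => hb ⟨hbs, hc⟩
          have hd1 : cs.drop (i+1) = [] := List.drop_eq_nil_of_le (by omega)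
          rw [hd1, hbs]
          simp [pyBgo]
        · rw [pyBgo_ne cs[i] _ hbs]
          simp [List.append_assoc]
    · simp only [dif_neg h]
      rw [List.drop_eq_nil_of_le (by omega)]
      simp [pyBgo]

-- ===== VERDICT (by name: the statement is the Claim_ definition above) =====
theorem py_byte_string_to_hex_py_spec : Claim_equal_py_byte_string_to_hex_py := by
  intro s _
  unfold Spec_py_byte_string_to_hex_py py_byte_string_to_hex_py py_byte_string_to_hex_py_alt
  rw [pyAgo_eq (s.toList.length) s.toList 0 [] rfl]
  simp
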